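-- pv_equiv track=rewrite | github.com/AvivYunker/PROJECTS | PYTHON/logic_functions/AND operation between 2 decimals.py | AND_operator
-- ===== SOURCE A (Python) =====
-- def AND_operator (arr1, arr2):
--     lim = len(arr1)
--     res = int(0)
--     level = int(1)
--     for cnt in range(0, lim, 1):
--         res = int(res + int(arr1[cnt] * arr2[cnt]) * level) # THIS IS THE PROBLEM!!!
--         level = int(level * 10)
--     return res
-- ===== SOURCE B (Python) =====
-- def AND_operator(arr1, arr2):
--     res = 0
--     for i in range(len(arr1) - 1, -1, -1):
--         res = res * 10 + arr1[i] * arr2[i]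
--     return res
-- ===== Notes on version B (the rewrite author's own statement) =====
-- stated objective: simpler
-- what changed: Replaces the forward pass maintaining an explicit power-of-ten accumulator `level` with Horner's method: a single backward pass keeping only one running accumulator res = res*10 + arr1[i]*arr2[i].
import Mathlib
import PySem

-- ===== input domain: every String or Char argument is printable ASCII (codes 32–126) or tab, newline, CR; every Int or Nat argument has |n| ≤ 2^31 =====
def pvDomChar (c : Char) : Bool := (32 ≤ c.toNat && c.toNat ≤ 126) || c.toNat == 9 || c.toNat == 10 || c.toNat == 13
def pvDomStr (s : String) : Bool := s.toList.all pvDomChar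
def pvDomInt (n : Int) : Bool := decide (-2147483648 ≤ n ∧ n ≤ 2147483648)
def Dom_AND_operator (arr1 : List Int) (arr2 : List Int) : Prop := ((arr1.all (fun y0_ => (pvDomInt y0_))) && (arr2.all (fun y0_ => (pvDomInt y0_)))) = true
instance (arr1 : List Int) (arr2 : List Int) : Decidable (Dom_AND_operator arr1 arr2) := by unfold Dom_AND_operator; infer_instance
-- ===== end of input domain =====

-- B replaces A's forward pass with a power-of-ten `level` accumulator by Horner's method
-- (one backward pass, single accumulator); objective: simpler, same value on all inputs A accepts.


-- ===== PORT A =====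
-- forward loop over range(len(arr1)); state (res, level); pyGetD is exact under Pre_ (indices in range)
def AND_operator (arr1 : List Int) (arr2 : List Int) : Int :=
  let lim : Int := arr1.length
  let st := (PySem.List.pyRange 0 lim 1).foldl
    (fun (st : Int × Int) cnt =>
      (st.1 + PySem.List.pyGetD arr1 cnt 0 * PySem.List.pyGetD arr2 cnt 0 * st.2, st.2 * 10))
    (0, 1)
  st.1

-- ===== PORT B =====
-- Horner: backward loop over range(len(arr1)-1, -1, -1), single accumulator
def AND_operator_alt (arr1 : List Int) (arr2 : List Int) : Int :=
  (PySem.List.pyRange ((arr1.length : Int) - 1) (-1) (-1)).foldl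
    (fun res i => res * 10 + PySem.List.pyGetD arr1 i 0 * PySem.List.pyGetD arr2 i 0) 0

-- ===== PRECONDITION & SPEC =====
-- Pre_ excludes exactly the inputs where A raises IndexError: arr2 shorter than arr1.
def Pre_AND_operator (arr1 : List Int) (arr2 : List Int) : Prop := arr1.length ≤ arr2.length
instance (arr1 : List Int) (arr2 : List Int) : Decidable (Pre_AND_operator arr1 arr2) := by unfold Pre_AND_operator; infer_instance
def pvWitness_AND_operator : List Int × List Int := ([1, 0, 1], [1, 1, 0])

def Spec_AND_operator (arr1 : List Int) (arr2 : List Int) (out : Int) : Prop := out = AND_operator_alt arr1 arr2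
instance (arr1 : List Int) (arr2 : List Int) (out : Int) : Decidable (Spec_AND_operator arr1 arr2 out) := by unfold Spec_AND_operator; infer_instance

-- ===== CLAIM (what is proved, stated in full; the proofs are below) =====
def Claim_equal_AND_operator : Prop := ∀ (arr1 : List Int) (arr2 : List Int), Dom_AND_operator arr1 arr2 → Pre_AND_operator arr1 arr2 → Spec_AND_operator arr1 arr2 (AND_operator arr1 arr2)

-- ===== LEMMAS AND PROOFS =====

-- weighted digit sum  Σ_{k<n} f k * 10^k, the common value of both loops
def pvHSum (f : Int → Int) : Nat → Int
  | 0 => 0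
  | n + 1 => pvHSum f n + f n * 10 ^ n

lemma pvFoldA (f : Int → Int) (n : Nat) :
    (PySem.List.pyRange 0 (n : Int) 1).foldl
      (fun (st : Int × Int) cnt => (st.1 + f cnt * st.2, st.2 * 10)) (0, 1)
    = (pvHSum f n, 10 ^ n) := by
  induction n with
  | zero => simp [pvHSum]
  | succ n ih =>
    have h : ((n : Int) + 1) = ((n + 1 : Nat) : Int) := by push_cast; ring
    rw [← h, PySem.List.pyRange_one_succ_right (by positivity), List.foldl_append, ih]
    simp [pvHSum, pow_succ, mul_comm]

lemma pvFoldB (f : Int → Int) (n : Nat) (acc : Int) :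
    (PySem.List.pyRange ((n : Int) - 1) (-1) (-1)).foldl
      (fun res i => res * 10 + f i) acc
    = acc * 10 ^ n + pvHSum f n := by
  induction n generalizing acc with
  | zero =>
    rw [show ((0:Nat):Int) - 1 = -1 by norm_num, PySem.List.pyRange_neg_one_eq_nil le_rfl]
    simp [pvHSum]
  | succ n ih =>
    have hlt : (-1 : Int) < ((n + 1 : Nat) : Int) - 1 := by push_cast; omega
    rw [PySem.List.pyRange_neg_one_cons hlt]
    have h1 : ((n + 1 : Nat) : Int) - 1 = (n : Int) := by push_cast; ring
    have h2 : ((n + 1 : Nat) : Int) - 1 - 1 = (n : Int) - 1 := by push_cast; ring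
    rw [List.foldl_cons, h2, ih, h1]
    simp [pvHSum, pow_succ]; ring

-- ===== VERDICT (by name: the statement is the Claim_ definition above) =====
theorem AND_operator_spec : Claim_equal_AND_operator := by
  intro arr1 arr2 _ _
  unfold Spec_AND_operator AND_operator AND_operator_alt
  dsimp only
  rw [pvFoldA (fun i => PySem.List.pyGetD arr1 i 0 * PySem.List.pyGetD arr2 i 0) arr1.length,
      pvFoldB (fun i => PySem.List.pyGetD arr1 i 0 * PySem.List.pyGetD arr2 i 0) arr1.length]
  simp
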